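-- pv_equiv track=rewrite | github.com/jerukan/PyPlume | pyplume/dataloaders.py | guess_wind_keys
-- ===== SOURCE A (Python) =====
-- def _remove_redundant_maps(mapping):
--     mapping_copy = {}
--     for k, v in mapping.items():
--         if k != v:
--             mapping_copy[k] = v
--     return mapping_copy
--
-- WIND_MAPPINGS = {
--     "dir": {"dir", "direction", "ang", "angle"},
--     "mag": {"mag", "spd", "speed", "magnitude"},
--     "U": {"u"},
--     "V": {"v"},
-- }
--
-- def guess_wind_keys(keys, exclude=None):
--     if exclude is None:
--         exclude = []
--     mappings = {}
--     checked = set()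
--     for key in keys:
--         for target, possible in WIND_MAPPINGS.items():
--             if (
--                 target not in exclude
--                 and key.lower() in possible
--                 and target not in checked
--             ):
--                 mappings[target] = key
--                 checked.add(target)
--     return _remove_redundant_maps(mappings)
-- ===== SOURCE B (Python) =====
-- # Reverse-lookup table: each lowercase alias -> its standard target name (alias sets are disjoint).
-- ALIAS_TO_TARGET = {
--     "dir": "dir", "direction": "dir", "ang": "dir", "angle": "dir",
--     "mag": "mag", "spd": "mag", "speed": "mag", "magnitude": "mag",
--     "u": "U", "v": "V",
-- }
--
-- def guess_wind_keys(keys, exclude=None):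
--     if exclude is None:
--         exclude = []
--     mappings = {}
--     for key in keys:
--         target = ALIAS_TO_TARGET.get(key.lower())
--         if target is not None and target not in exclude and target not in mappings:
--             mappings[target] = key
--     return {t: k for t, k in mappings.items() if t != k}
-- ===== Notes on version B (the rewrite author's own statement) =====
-- stated objective: faster
-- what changed: Replaces the inner loop over the four target/alias-set pairs (each iteration doing an O(|exclude|) list scan) by one precomputed alias-to-target reverse-dictionary lookup per key, scanning exclude only on a hit, and replaces the dict-rebuilding _remove_redundant_maps helper by a comprehension filter.
import Mathlib
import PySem

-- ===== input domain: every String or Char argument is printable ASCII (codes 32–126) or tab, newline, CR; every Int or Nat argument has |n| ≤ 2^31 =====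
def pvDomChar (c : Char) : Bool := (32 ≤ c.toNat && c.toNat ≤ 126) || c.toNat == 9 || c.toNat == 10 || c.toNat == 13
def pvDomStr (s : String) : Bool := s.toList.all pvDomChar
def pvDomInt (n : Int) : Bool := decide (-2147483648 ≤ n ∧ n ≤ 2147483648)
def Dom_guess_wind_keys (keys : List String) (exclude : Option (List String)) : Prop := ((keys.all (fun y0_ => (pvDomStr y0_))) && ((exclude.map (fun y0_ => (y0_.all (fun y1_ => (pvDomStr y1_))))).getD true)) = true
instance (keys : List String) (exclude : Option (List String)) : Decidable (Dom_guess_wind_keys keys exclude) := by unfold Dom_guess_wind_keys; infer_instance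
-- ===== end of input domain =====

-- B replaces A's inner loop over the four target/alias-set pairs by one precomputed
-- alias-to-target reverse-dictionary lookup per key (idiomatic; same result).


-- ===== PORT A =====
-- WIND_MAPPINGS, in Python's insertion order
def pvWindMappings : List (String × PySem.Set String) :=
  [("dir", PySem.Set.ofList ["dir", "direction", "ang", "angle"]),
   ("mag", PySem.Set.ofList ["mag", "spd", "speed", "magnitude"]),
   ("U", PySem.Set.ofList ["u"]),
   ("V", PySem.Set.ofList ["v"])]

-- body of A's outer loop: the inner 'for target, possible in WIND_MAPPINGS.items()'
def pvStepA (ex : List String) (st : PySem.Dict String String × PySem.Set String)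
    (key : String) : PySem.Dict String String × PySem.Set String :=
  pvWindMappings.foldl (fun st tp =>
    if !ex.contains tp.1 && PySem.Set.contains tp.2 (PySem.Str.lower key)
        && !PySem.Set.contains st.2 tp.1
    then (st.1.insert tp.1 key, PySem.Set.add st.2 tp.1)
    else st) st

-- _remove_redundant_maps: rebuild the dict keeping entries with k != v
def pvRemoveRedundant (l : List (String × String)) : PySem.Dict String String :=
  l.foldl (fun acc kv => if kv.1 != kv.2 then acc.insert kv.1 kv.2 else acc) PySem.Dict.empty

def guess_wind_keys (keys : List String) (exclude : Option (List String)) : List (String × String) :=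
  let ex := exclude.getD []
  let st := keys.foldl (pvStepA ex) (PySem.Dict.empty, PySem.Set.empty)
  (pvRemoveRedundant st.1.items).items

-- ===== PORT B =====
-- ALIAS_TO_TARGET from Source B
def pvAliasToTarget : PySem.Dict String String := PySem.Dict.ofList
  [("dir", "dir"), ("direction", "dir"), ("ang", "dir"), ("angle", "dir"),
   ("mag", "mag"), ("spd", "mag"), ("speed", "mag"), ("magnitude", "mag"),
   ("u", "U"), ("v", "V")]

-- body of B's single loop: one reverse-dictionary lookup per key
def pvStepB (ex : List String) (m : PySem.Dict String String) (key : String) :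
    PySem.Dict String String :=
  match pvAliasToTarget.get? (PySem.Str.lower key) with
  | some target => if !ex.contains target && !m.contains target then m.insert target key else m
  | none => m

def guess_wind_keys_alt (keys : List String) (exclude : Option (List String)) : List (String × String) :=
  let ex := exclude.getD []
  let m := keys.foldl (pvStepB ex) PySem.Dict.empty
  m.items.filter (fun kv => kv.1 != kv.2)

-- ===== PRECONDITION & SPEC =====
def Spec_guess_wind_keys (keys : List String) (exclude : Option (List String)) (out : List (String × String)) : Prop := out = guess_wind_keys_alt keys exclude
instance (keys : List String) (exclude : Option (List String)) (out : List (String × String)) : Decidable (Spec_guess_wind_keys keys exclude out) := by unfold Spec_guess_wind_keys; infer_instance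

-- ===== CLAIM (what is proved, stated in full; the proofs are below) =====
def Claim_equal_guess_wind_keys : Prop := ∀ (keys : List String) (exclude : Option (List String)), Dom_guess_wind_keys keys exclude → Spec_guess_wind_keys keys exclude (guess_wind_keys keys exclude)

-- ===== LEMMAS AND PROOFS =====

-- helper: the key set of a dict stays duplicate-free under a fresh insert
theorem nodup_keys_insert (m : PySem.Dict String String) (k v : String)
    (hnd : m.keys.Nodup) (hc : m.contains k = false) : (m.insert k v).keys.Nodup := by
  have hk : k ∉ m.keys := by
    intro hk; rw [(PySem.Dict.contains_iff_mem_keys m k).mpr hk] at hc; cases hc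
  simp only [PySem.Dict.keys, PySem.Dict.items_insert_of_not_contains m v hc,
    List.map_append] at *
  simp only [List.nodup_append]
  refine ⟨hnd, by simp, ?_⟩
  intro a ha b hb
  simp at hb; subst hb
  intro hab; subst hab; exact hk ha

theorem pvStep_eq (ex : List String) (m : PySem.Dict String String) (c : PySem.Set String)
    (key : String) (h : ∀ t, c.contains t = m.contains t) (hnd : m.keys.Nodup) :
    (pvStepA ex (m, c) key).1 = pvStepB ex m key
    ∧ (∀ t, (pvStepA ex (m, c) key).2.contains t = (pvStepB ex m key).contains t)
    ∧ (pvStepB ex m key).keys.Nodup := by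
  have h' : ∀ t, t ∈ c ↔ m.contains t = true := by
    intro t; rw [← h]; simp [PySem.Set.contains]
  by_cases h1 : PySem.Str.lower key = "dir"
  · have hg : pvAliasToTarget.get? "dir" = some "dir" := by decide
    refine ⟨?_, ?_, ?_⟩
    · simp [pvStepA, pvStepB, pvWindMappings, h1, PySem.Set.contains, hg, h']
      split_ifs <;> rfl
    · intro t
      simp [pvStepA, pvStepB, pvWindMappings, h1, PySem.Set.contains, hg, h']
      split_ifs with hc
      · by_cases ht : t = "dir" <;> simp [ht, h', PySem.Dict.contains_insert]
      · simp [h']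
    · simp [pvStepA, pvStepB, pvWindMappings, h1, PySem.Set.contains, hg, h']
      split_ifs with hc
      · exact nodup_keys_insert m "dir" key hnd (by simpa using hc.2)
      · exact hnd
  by_cases h2 : PySem.Str.lower key = "direction"
  · have hg : pvAliasToTarget.get? "direction" = some "dir" := by decide
    refine ⟨?_, ?_, ?_⟩
    · simp [pvStepA, pvStepB, pvWindMappings, h2, PySem.Set.contains, hg, h']
      split_ifs <;> rfl
    · intro t
      simp [pvStepA, pvStepB, pvWindMappings, h2, PySem.Set.contains, hg, h']
      split_ifs with hc
      · by_cases ht : t = "dir" <;> simp [ht, h', PySem.Dict.contains_insert]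
      · simp [h']
    · simp [pvStepA, pvStepB, pvWindMappings, h2, PySem.Set.contains, hg, h']
      split_ifs with hc
      · exact nodup_keys_insert m "dir" key hnd (by simpa using hc.2)
      · exact hnd
  by_cases h3 : PySem.Str.lower key = "ang"
  · have hg : pvAliasToTarget.get? "ang" = some "dir" := by decide
    refine ⟨?_, ?_, ?_⟩
    · simp [pvStepA, pvStepB, pvWindMappings, h3, PySem.Set.contains, hg, h']
      split_ifs <;> rfl
    · intro t
      simp [pvStepA, pvStepB, pvWindMappings, h3, PySem.Set.contains, hg, h']
      split_ifs with hc
      · by_cases ht : t = "dir" <;> simp [ht, h', PySem.Dict.contains_insert]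
      · simp [h']
    · simp [pvStepA, pvStepB, pvWindMappings, h3, PySem.Set.contains, hg, h']
      split_ifs with hc
      · exact nodup_keys_insert m "dir" key hnd (by simpa using hc.2)
      · exact hnd
  by_cases h4 : PySem.Str.lower key = "angle"
  · have hg : pvAliasToTarget.get? "angle" = some "dir" := by decide
    refine ⟨?_, ?_, ?_⟩
    · simp [pvStepA, pvStepB, pvWindMappings, h4, PySem.Set.contains, hg, h']
      split_ifs <;> rfl
    · intro t
      simp [pvStepA, pvStepB, pvWindMappings, h4, PySem.Set.contains, hg, h']
      split_ifs with hc
      · by_cases ht : t = "dir" <;> simp [ht, h', PySem.Dict.contains_insert]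
      · simp [h']
    · simp [pvStepA, pvStepB, pvWindMappings, h4, PySem.Set.contains, hg, h']
      split_ifs with hc
      · exact nodup_keys_insert m "dir" key hnd (by simpa using hc.2)
      · exact hnd
  by_cases h5 : PySem.Str.lower key = "mag"
  · have hg : pvAliasToTarget.get? "mag" = some "mag" := by decide
    refine ⟨?_, ?_, ?_⟩
    · simp [pvStepA, pvStepB, pvWindMappings, h5, PySem.Set.contains, hg, h']
      split_ifs <;> rfl
    · intro t
      simp [pvStepA, pvStepB, pvWindMappings, h5, PySem.Set.contains, hg, h']
      split_ifs with hc
      · by_cases ht : t = "mag" <;> simp [ht, h', PySem.Dict.contains_insert]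
      · simp [h']
    · simp [pvStepA, pvStepB, pvWindMappings, h5, PySem.Set.contains, hg, h']
      split_ifs with hc
      · exact nodup_keys_insert m "mag" key hnd (by simpa using hc.2)
      · exact hnd
  by_cases h6 : PySem.Str.lower key = "spd"
  · have hg : pvAliasToTarget.get? "spd" = some "mag" := by decide
    refine ⟨?_, ?_, ?_⟩
    · simp [pvStepA, pvStepB, pvWindMappings, h6, PySem.Set.contains, hg, h']
      split_ifs <;> rfl
    · intro t
      simp [pvStepA, pvStepB, pvWindMappings, h6, PySem.Set.contains, hg, h']
      split_ifs with hc
      · by_cases ht : t = "mag" <;> simp [ht, h', PySem.Dict.contains_insert]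
      · simp [h']
    · simp [pvStepA, pvStepB, pvWindMappings, h6, PySem.Set.contains, hg, h']
      split_ifs with hc
      · exact nodup_keys_insert m "mag" key hnd (by simpa using hc.2)
      · exact hnd
  by_cases h7 : PySem.Str.lower key = "speed"
  · have hg : pvAliasToTarget.get? "speed" = some "mag" := by decide
    refine ⟨?_, ?_, ?_⟩
    · simp [pvStepA, pvStepB, pvWindMappings, h7, PySem.Set.contains, hg, h']
      split_ifs <;> rfl
    · intro t
      simp [pvStepA, pvStepB, pvWindMappings, h7, PySem.Set.contains, hg, h']
      split_ifs with hc
      · by_cases ht : t = "mag" <;> simp [ht, h', PySem.Dict.contains_insert]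
      · simp [h']
    · simp [pvStepA, pvStepB, pvWindMappings, h7, PySem.Set.contains, hg, h']
      split_ifs with hc
      · exact nodup_keys_insert m "mag" key hnd (by simpa using hc.2)
      · exact hnd
  by_cases h8 : PySem.Str.lower key = "magnitude"
  · have hg : pvAliasToTarget.get? "magnitude" = some "mag" := by decide
    refine ⟨?_, ?_, ?_⟩
    · simp [pvStepA, pvStepB, pvWindMappings, h8, PySem.Set.contains, hg, h']
      split_ifs <;> rfl
    · intro t
      simp [pvStepA, pvStepB, pvWindMappings, h8, PySem.Set.contains, hg, h']
      split_ifs with hc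
      · by_cases ht : t = "mag" <;> simp [ht, h', PySem.Dict.contains_insert]
      · simp [h']
    · simp [pvStepA, pvStepB, pvWindMappings, h8, PySem.Set.contains, hg, h']
      split_ifs with hc
      · exact nodup_keys_insert m "mag" key hnd (by simpa using hc.2)
      · exact hnd
  by_cases h9 : PySem.Str.lower key = "u"
  · have hg : pvAliasToTarget.get? "u" = some "U" := by decide
    refine ⟨?_, ?_, ?_⟩
    · simp [pvStepA, pvStepB, pvWindMappings, h9, PySem.Set.contains, hg, h']
      split_ifs <;> rfl
    · intro t
      simp [pvStepA, pvStepB, pvWindMappings, h9, PySem.Set.contains, hg, h']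
      split_ifs with hc
      · by_cases ht : t = "U" <;> simp [ht, h', PySem.Dict.contains_insert]
      · simp [h']
    · simp [pvStepA, pvStepB, pvWindMappings, h9, PySem.Set.contains, hg, h']
      split_ifs with hc
      · exact nodup_keys_insert m "U" key hnd (by simpa using hc.2)
      · exact hnd
  by_cases h10 : PySem.Str.lower key = "v"
  · have hg : pvAliasToTarget.get? "v" = some "V" := by decide
    refine ⟨?_, ?_, ?_⟩
    · simp [pvStepA, pvStepB, pvWindMappings, h10, PySem.Set.contains, hg, h']
      split_ifs <;> rfl
    · intro t
      simp [pvStepA, pvStepB, pvWindMappings, h10, PySem.Set.contains, hg, h']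
      split_ifs with hc
      · by_cases ht : t = "V" <;> simp [ht, h', PySem.Dict.contains_insert]
      · simp [h']
    · simp [pvStepA, pvStepB, pvWindMappings, h10, PySem.Set.contains, hg, h']
      split_ifs with hc
      · exact nodup_keys_insert m "V" key hnd (by simpa using hc.2)
      · exact hnd
  -- no alias matched: both steps leave the state unchanged
  have hit : pvAliasToTarget.items =
      [("dir", "dir"), ("direction", "dir"), ("ang", "dir"), ("angle", "dir"),
       ("mag", "mag"), ("spd", "mag"), ("speed", "mag"), ("magnitude", "mag"),
       ("u", "U"), ("v", "V")] := by decide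
  refine ⟨?_, ?_, ?_⟩ <;>
    simp [pvStepA, pvStepB, pvWindMappings, PySem.Set.contains, PySem.Set.mem_ofList,
      PySem.Dict.get?, hit, h', h1, h2, h3, h4, h5, h6, h7, h8, h9, h10, Ne.symm h1, Ne.symm h2, Ne.symm h3, Ne.symm h4, Ne.symm h5, Ne.symm h6, Ne.symm h7, Ne.symm h8, Ne.symm h9, Ne.symm h10, h, hnd]

theorem pvFold_eq (ex : List String) (keys : List String) :
    ∀ (m : PySem.Dict String String) (c : PySem.Set String),
      (∀ t, c.contains t = m.contains t) → m.keys.Nodup →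
      (keys.foldl (pvStepA ex) (m, c)).1 = keys.foldl (pvStepB ex) m
      ∧ (keys.foldl (pvStepB ex) m).keys.Nodup := by
  induction keys with
  | nil => intro m c h hnd; exact ⟨rfl, hnd⟩
  | cons k ks ih =>
    intro m c h hnd
    obtain ⟨e1, e2, e3⟩ := pvStep_eq ex m c k h hnd
    simp only [List.foldl_cons]
    have hsplit : pvStepA ex (m, c) k = (pvStepB ex m k, (pvStepA ex (m, c) k).2) := by
      rw [← e1]
    rw [hsplit]
    exact ih (pvStepB ex m k) _ (by simpa using e2) e3

-- _remove_redundant_maps over a dup-free-keys items list is just a filter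
theorem pvRR_aux (l : List (String × String)) :
    ∀ acc : PySem.Dict String String, (l.map (fun kv => kv.1)).Nodup →
      (∀ p ∈ l, acc.contains p.1 = false) →
      (l.foldl (fun acc kv => if kv.1 != kv.2 then acc.insert kv.1 kv.2 else acc) acc).items
        = acc.items ++ l.filter (fun kv => kv.1 != kv.2) := by
  induction l with
  | nil => intro acc _ _; simp
  | cons p l ih =>
    intro acc hnd hfresh
    simp only [List.map_cons, List.nodup_cons] at hnd
    simp only [List.foldl_cons]
    by_cases hpv : (p.1 != p.2) = true
    · rw [if_pos hpv]
      have hfresh' : ∀ q ∈ l, (acc.insert p.1 p.2).contains q.1 = false := by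
        intro q hq
        rw [PySem.Dict.contains_insert]
        have hne : q.1 ≠ p.1 := by
          intro hqp; exact hnd.1 (hqp ▸ List.mem_map_of_mem hq)
        simp [hne, hfresh q (List.mem_cons_of_mem p hq)]
      rw [ih (acc.insert p.1 p.2) hnd.2 hfresh',
        PySem.Dict.items_insert_of_not_contains acc p.2 (hfresh p List.mem_cons_self)]
      simp [List.filter_cons, hpv]
    · rw [if_neg hpv, ih acc hnd.2 (fun q hq => hfresh q (List.mem_cons_of_mem p hq))]
      simp [List.filter_cons, hpv]

theorem pvRemoveRedundant_items (l : List (String × String)) (hnd : (l.map (fun kv => kv.1)).Nodup) :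
    (pvRemoveRedundant l).items = l.filter (fun kv => kv.1 != kv.2) := by
  have := pvRR_aux l PySem.Dict.empty hnd (fun p _ => rfl)
  simpa [pvRemoveRedundant] using this

-- ===== VERDICT (by name: the statement is the Claim_ definition above) =====
theorem guess_wind_keys_spec : Claim_equal_guess_wind_keys := by
  intro keys exclude _hd
  show (pvRemoveRedundant (List.foldl (pvStepA (exclude.getD [])) (PySem.Dict.empty, PySem.Set.empty) keys).1.items).items
      = List.filter (fun kv => kv.1 != kv.2) (List.foldl (pvStepB (exclude.getD [])) PySem.Dict.empty keys).items
  obtain ⟨h1, h2⟩ := pvFold_eq (exclude.getD []) keys PySem.Dict.empty PySem.Set.empty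
    (by intro t; rfl) (by simp [PySem.Dict.empty, PySem.Dict.keys])
  rw [h1, pvRemoveRedundant_items _ h2]
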